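-- pv_equiv track=rewrite | github.com/htang7415/PolyDiT | Multi_View_Foundation/scripts/step8_build_paper_package.py | _repr_label
-- ===== SOURCE A (Python) =====
-- def _repr_label(value: object) -> str:
--     text = str(value).strip()
--     if not text:
--         return "Unknown"
--     lower = text.lower().replace("-", "_").replace(" ", "_")
--     mapping = {
--         "smiles": "SMILES",
--         "smiles_bpe": "SMILES-BPE",
--         "selfies": "SELFIES",
--         "group_selfies": "Group-SELFIES",
--         "graph": "Graph",
--         "multiview_mean": "MVF Mean",
--         "multi_view_mean": "MVF Mean",
--         "multiviewmean": "MVF Mean",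
--         "mvf_mean": "MVF Mean",
--     }
--     if lower in mapping:
--         return mapping[lower]
--     if lower.startswith("bi_diffusion_"):
--         return _repr_label(lower.replace("bi_diffusion_", ""))
--     return text
-- ===== SOURCE B (Python) =====
-- _MAPPING = {
--     "smiles": "SMILES",
--     "smiles_bpe": "SMILES-BPE",
--     "selfies": "SELFIES",
--     "group_selfies": "Group-SELFIES",
--     "graph": "Graph",
--     "multiview_mean": "MVF Mean",
--     "multi_view_mean": "MVF Mean",
--     "multiviewmean": "MVF Mean",
--     "mvf_mean": "MVF Mean",
-- }
--
--
-- def _repr_label(value: object) -> str: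
--     text = str(value).strip()
--     if not text:
--         return "Unknown"
--     # Normalize once; the loop below keeps `cur` normalized (lowercase,
--     # no '-' or ' '), so it only needs to drop prefixes and re-strip.
--     cur = text.lower().replace("-", "_").replace(" ", "_")
--     if cur in _MAPPING:
--         return _MAPPING[cur]
--     if not cur.startswith("bi_diffusion_"):
--         return text
--     while True:
--         cur = cur.replace("bi_diffusion_", "").strip()
--         if not cur:
--             return "Unknown"
--         if cur in _MAPPING:
--             return _MAPPING[cur]
--         if not cur.startswith("bi_diffusion_"):
--             return cur
-- ===== Notes on version B (the rewrite author's own statement) =====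
-- stated objective: alternative
-- what changed: A re-normalizes (strip, lower, replace '-' and ' ') the whole string in every tail-recursive call; B normalizes once up front and then runs a while-loop that only drops 'bi_diffusion_' prefixes and re-strips, maintaining the normalized form as a loop invariant.
import Mathlib
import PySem

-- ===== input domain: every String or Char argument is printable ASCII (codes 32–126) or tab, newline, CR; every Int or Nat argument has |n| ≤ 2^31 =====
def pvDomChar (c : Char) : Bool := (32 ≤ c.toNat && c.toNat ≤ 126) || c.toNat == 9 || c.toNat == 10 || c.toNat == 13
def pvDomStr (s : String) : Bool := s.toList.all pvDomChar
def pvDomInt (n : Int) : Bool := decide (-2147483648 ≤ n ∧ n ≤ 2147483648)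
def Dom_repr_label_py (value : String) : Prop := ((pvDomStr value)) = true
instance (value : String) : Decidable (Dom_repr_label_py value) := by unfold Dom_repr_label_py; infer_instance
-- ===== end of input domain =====

-- B normalizes the string once and then runs a loop that only drops "bi_diffusion_"
-- prefixes and re-strips, instead of A's tail recursion that re-lowercases and
-- re-replaces the whole string at every level; same return value (objective: alternative).

-- shared data: the literal dict of both Pythons
def pvMap : PySem.Dict String String := PySem.Dict.ofList
  [("smiles", "SMILES"), ("smiles_bpe", "SMILES-BPE"), ("selfies", "SELFIES"),
   ("group_selfies", "Group-SELFIES"), ("graph", "Graph"), ("multiview_mean", "MVF Mean"),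
   ("multi_view_mean", "MVF Mean"), ("multiviewmean", "MVF Mean"), ("mvf_mean", "MVF Mean")]

-- ===== PORT A =====
-- A's tail recursion; the fuel argument is only a totality guard (each recursive
-- call shrinks the string by ≥ 13 characters, so the initial fuel never runs out).
def reprAuxA : Nat → String → String
  | 0, _ => "Unknown"
  | fuel+1, value =>
    let text := PySem.Str.strip value
    if text = "" then "Unknown"
    else
      let lower := PySem.Str.replace (PySem.Str.replace (PySem.Str.lower text) "-" "_") " " "_"
      if pvMap.contains lower then pvMap.getD lower ""
      else if PySem.Str.startswith lower "bi_diffusion_" then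
        reprAuxA fuel (PySem.Str.replace lower "bi_diffusion_" "")
      else text

def repr_label_py (value : String) : String := reprAuxA (value.toList.length + 1) value

-- ===== PORT B =====
-- B's while-loop; fuel is only a totality guard (each iteration shrinks `cur` by ≥ 13).
def loopB : Nat → String → String
  | 0, _ => "Unknown"
  | fuel+1, cur0 =>
    let cur := PySem.Str.strip (PySem.Str.replace cur0 "bi_diffusion_" "")
    if cur = "" then "Unknown"
    else
      if pvMap.contains cur then pvMap.getD cur ""
      else if PySem.Str.startswith cur "bi_diffusion_" then loopB fuel cur
      else cur

def repr_label_py_alt (value : String) : String :=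
  let text := PySem.Str.strip value
  if text = "" then "Unknown"
  else
    let cur := PySem.Str.replace (PySem.Str.replace (PySem.Str.lower text) "-" "_") " " "_"
    if pvMap.contains cur then pvMap.getD cur ""
    else if PySem.Str.startswith cur "bi_diffusion_" then loopB cur.toList.length cur
    else text

-- ===== PRECONDITION & SPEC =====
def Spec_repr_label_py (value : String) (out : String) : Prop := out = repr_label_py_alt value
instance (value : String) (out : String) : Decidable (Spec_repr_label_py value out) := by unfold Spec_repr_label_py; infer_instance

-- ===== CLAIM (what is proved, stated in full; the proofs are below) =====
def Claim_equal_repr_label_py : Prop := ∀ (value : String), Dom_repr_label_py value → Spec_repr_label_py value (repr_label_py value)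

-- ===== LEMMAS AND PROOFS =====

-- the invariant B's loop maintains: lowercase, no '-', no ' ' (what normalization guarantees)
def pvNorm (c : Char) : Prop := PySem.Chars.isupper c = false ∧ c ≠ '-' ∧ c ≠ ' '
def pvNormS (s : String) : Prop := ∀ c ∈ s.toList, pvNorm c

def normalizeS (s : String) : String :=
  PySem.Str.replace (PySem.Str.replace (PySem.Str.lower s) "-" "_") " " "_"

theorem mem_replace_go {old new : List Char} {c : Char} :
    ∀ (fuel : Nat) (l acc : List Char), c ∈ PySem.Chars.replace.go old new fuel l acc →
      c ∈ l ∨ c ∈ new ∨ c ∈ acc := by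
  intro fuel
  induction fuel with
  | zero => intro l acc h; simp [PySem.Chars.replace.go] at h; tauto
  | succ n ih =>
    intro l acc h
    match l with
    | [] => simp [PySem.Chars.replace.go] at h; tauto
    | x :: t =>
      rw [PySem.Chars.replace.go] at h
      split at h
      · rcases ih _ _ h with h' | h' | h'
        · exact Or.inl (List.mem_of_mem_drop h')
        · tauto
        · simp at h'; tauto
      · rcases ih _ _ h with h' | h' | h'
        · simp [h']
        · tauto
        · simp at h'; rcases h' with h' | h' <;> simp [h']

theorem mem_replace {l old new : List Char} {c : Char} (hold : old ≠ [])
    (h : c ∈ PySem.Chars.replace l old new) : c ∈ l ∨ c ∈ new := by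
  rw [PySem.Chars.replace] at h
  rw [if_neg (by simpa using hold)] at h
  have := mem_replace_go _ _ _ h
  simpa using this

theorem replace_go_single_id {d : Char} {new : List Char} :
    ∀ (fuel : Nat) (l acc : List Char), d ∉ l →
      PySem.Chars.replace.go [d] new fuel l acc = acc.reverse ++ l := by
  intro fuel
  induction fuel with
  | zero => intro l acc _; simp [PySem.Chars.replace.go]
  | succ n ih =>
    intro l acc hd
    match l with
    | [] => simp [PySem.Chars.replace.go]
    | x :: t =>
      rw [PySem.Chars.replace.go]
      have hx : d ≠ x := by intro h; exact hd (by simp [h])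
      have : [d].isPrefixOf (x :: t) = false := by
        simp [List.isPrefixOf]; exact fun h => hx h
      rw [if_neg (by simp [this])]
      rw [ih t (x :: acc) (fun h => hd (by simp [h]))]
      simp

theorem replace_single_id {l : List Char} {d : Char} {new : List Char} (h : d ∉ l) :
    PySem.Chars.replace l [d] new = l := by
  rw [PySem.Chars.replace, if_neg (by simp)]
  rw [replace_go_single_id _ _ _ h]
  simp

theorem not_mem_replace_go_single {d : Char} {new : List Char} (hd : d ∉ new) :
    ∀ (fuel : Nat) (l acc : List Char), l.length ≤ fuel → d ∉ acc →
      d ∉ PySem.Chars.replace.go [d] new fuel l acc := by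
  intro fuel
  induction fuel with
  | zero =>
    intro l acc hl hacc
    have : l = [] := List.length_eq_zero_iff.1 (Nat.le_zero.1 hl)
    subst this; simp [PySem.Chars.replace.go, hacc]
  | succ n ih =>
    intro l acc hl hacc
    match l with
    | [] => simp [PySem.Chars.replace.go, hacc]
    | x :: t =>
      rw [PySem.Chars.replace.go]
      split
      · exact ih _ _ (by simp at hl ⊢; omega) (by simp [hacc, hd])
      · refine ih _ _ (by simp at hl ⊢; omega) ?_
        intro hmem
        rcases List.mem_cons.1 hmem with h | h
        · rename_i hpre
          subst h
          simp [List.isPrefixOf] at hpre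
        · exact hacc h

theorem not_mem_replace_single {l : List Char} {d : Char} {new : List Char} (hd : d ∉ new) :
    d ∉ PySem.Chars.replace l [d] new := by
  rw [PySem.Chars.replace, if_neg (by simp)]
  exact not_mem_replace_go_single hd l.length l [] le_rfl (List.not_mem_nil)

theorem isupper_lowerChar (c : Char) : PySem.Chars.isupper (PySem.Chars.lowerChar c) = false := by
  rw [PySem.Chars.lowerChar]
  by_cases h : PySem.Chars.isupper c = true
  · rw [if_pos h]
    rw [PySem.Chars.isupper] at h ⊢
    simp only [Bool.and_eq_true, decide_eq_true_eq, Char.le_def] at h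
    have h65 : ('A').val.toNat = 65 := by decide
    have h90 : ('Z').val.toNat = 90 := by decide
    have hb : 65 ≤ c.toNat ∧ c.toNat ≤ 90 := by
      unfold Char.toNat
      constructor
      · have := h.1; rw [UInt32.le_iff_toNat_le] at this; omega
      · have := h.2; rw [UInt32.le_iff_toNat_le] at this; omega
    have hv : Nat.isValidChar (c.toNat + 32) := Or.inl (by omega)
    simp only [Bool.and_eq_false_iff, decide_eq_false_iff_not, Char.le_def]
    right
    rw [UInt32.le_iff_toNat_le]
    have : ((Char.ofNat (c.toNat + 32)).val).toNat = c.toNat + 32 := by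
      have := Char.toNat_ofNat (c.toNat + 32)
      rw [if_pos hv] at this
      exact this
    rw [this, h90]
    omega
  · rw [if_neg h]
    exact Bool.not_eq_true _ |>.mp h

theorem lowerChar_of_not_upper {c : Char} (h : PySem.Chars.isupper c = false) :
    PySem.Chars.lowerChar c = c := by
  rw [PySem.Chars.lowerChar, if_neg (by simp [h])]

theorem mem_strip {l : List Char} {c : Char} (h : c ∈ PySem.Chars.strip l) : c ∈ l := by
  rw [PySem.Chars.strip, PySem.Chars.rstrip, PySem.Chars.lstrip] at h
  rw [List.mem_reverse] at h
  have h1 := (List.dropWhile_sublist (p := PySem.Chars.isspace)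
    (l := (List.dropWhile PySem.Chars.isspace l).reverse)).mem h
  rw [List.mem_reverse] at h1
  exact (List.dropWhile_sublist _).mem h1

theorem length_strip_le (l : List Char) : (PySem.Chars.strip l).length ≤ l.length := by
  rw [PySem.Chars.strip, PySem.Chars.rstrip, PySem.Chars.lstrip]
  rw [List.length_reverse]
  calc (List.dropWhile PySem.Chars.isspace (List.dropWhile PySem.Chars.isspace l).reverse).length
      ≤ (List.dropWhile PySem.Chars.isspace l).reverse.length := (List.dropWhile_sublist _).length_le
    _ = (List.dropWhile PySem.Chars.isspace l).length := List.length_reverse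
    _ ≤ l.length := (List.dropWhile_sublist _).length_le

theorem replace_go_length_le {old new : List Char} (hnew : new.length ≤ old.length) :
    ∀ (fuel : Nat) (l acc : List Char),
      (PySem.Chars.replace.go old new fuel l acc).length ≤ acc.length + l.length := by
  intro fuel
  induction fuel with
  | zero => intro l acc; simp [PySem.Chars.replace.go]
  | succ n ih =>
    intro l acc
    match l with
    | [] => simp [PySem.Chars.replace.go]
    | x :: t =>
      rw [PySem.Chars.replace.go]
      split
      · rename_i hpre
        have hol : old.length ≤ (x :: t).length := (List.isPrefixOf_iff_prefix.mp hpre).length_le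
        calc (PySem.Chars.replace.go old new n (List.drop old.length (x :: t)) (new.reverse ++ acc)).length
            ≤ (new.reverse ++ acc).length + (List.drop old.length (x :: t)).length := ih _ _
          _ ≤ _ := by simp at hol ⊢; omega
      · calc (PySem.Chars.replace.go old new n t (x :: acc)).length
            ≤ (x :: acc).length + t.length := ih _ _
          _ ≤ _ := by simp; omega

theorem replace_length_le {l old new : List Char} (hnew : new.length ≤ old.length)
    (hne : old ≠ []) : (PySem.Chars.replace l old new).length ≤ l.length := by
  rw [PySem.Chars.replace, if_neg (by simpa using hne)]
  simpa using replace_go_length_le hnew l.length l []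

theorem replace_del_length_le {l old : List Char} (hp : old.isPrefixOf l = true) (hne : old ≠ []) :
    (PySem.Chars.replace l old []).length + old.length ≤ l.length := by
  rw [PySem.Chars.replace, if_neg (by simpa using hne)]
  have hle : old.length ≤ l.length := (List.isPrefixOf_iff_prefix.mp hp).length_le
  have hold1 : 1 ≤ old.length := by cases old <;> simp_all
  match l with
  | [] => cases old <;> simp_all [List.isPrefixOf]
  | x :: t =>
    rw [List.length_cons, PySem.Chars.replace.go, if_pos hp]
    simp only [List.reverse_nil, List.nil_append]
    have := replace_go_length_le (old := old) (new := []) (by simp) t.length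
      (List.drop old.length (x :: t)) []
    simp only [List.length_nil, List.length_drop, List.length_cons, Nat.zero_add] at this
    simp only [List.length_cons] at hle
    omega

theorem pvNormS_normalize (s : String) : pvNormS (normalizeS s) := by
  intro c hc
  have edash : ("-" : String).toList = ['-'] := by decide
  have espace : (" " : String).toList = [' '] := by decide
  have eund : ("_" : String).toList = ['_'] := by decide
  rw [normalizeS, PySem.Str.toList_replace, PySem.Str.toList_replace, PySem.Str.toList_lower,
    edash, espace, eund] at hc
  have hsp : c ≠ ' ' := by
    intro h; subst h
    exact not_mem_replace_single (new := ['_']) (by decide) hc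
  rcases mem_replace (by decide) hc with h1 | h1
  · have hmi : c ≠ '-' := by
      intro h; subst h
      exact not_mem_replace_single (new := ['_']) (by decide) h1
    rcases mem_replace (by decide) h1 with h2 | h2
    · rw [PySem.Chars.lower] at h2
      rcases List.mem_map.1 h2 with ⟨c', _, hc'⟩
      exact ⟨hc' ▸ isupper_lowerChar c', hmi, hsp⟩
    · simp at h2; subst h2; exact ⟨by decide, by decide, by decide⟩
  · simp at h1; subst h1; exact ⟨by decide, by decide, by decide⟩

theorem normalize_id {s : String} (h : pvNormS s) : normalizeS s = s := by
  rw [← String.toList_inj, normalizeS, PySem.Str.toList_replace, PySem.Str.toList_replace,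
    PySem.Str.toList_lower]
  have hlow : PySem.Chars.lower s.toList = s.toList := by
    rw [PySem.Chars.lower]
    conv_rhs => rw [← List.map_id s.toList]
    exact List.map_congr_left fun c hc => lowerChar_of_not_upper (h c hc).1
  rw [hlow]
  have h1 : PySem.Chars.replace s.toList ("-".toList) ("_".toList) = s.toList := by
    have : "-".toList = ['-'] := by decide
    rw [this]
    exact replace_single_id (fun hm => (h _ hm).2.1 rfl)
  rw [h1]
  have : " ".toList = [' '] := by decide
  rw [this]
  exact replace_single_id (fun hm => (h _ hm).2.2 rfl)

theorem pvNormS_strip_replace {s : String} (h : pvNormS s) :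
    pvNormS (PySem.Str.strip (PySem.Str.replace s "bi_diffusion_" "")) := by
  intro c hc
  rw [PySem.Str.toList_strip, PySem.Str.toList_replace] at hc
  have hc1 := mem_strip hc
  rcases mem_replace (by decide) hc1 with h1 | h1
  · exact h c h1
  · simp at h1

theorem startswith_length {s : String}
    (h : PySem.Str.startswith s "bi_diffusion_" = true) : 13 ≤ s.toList.length := by
  rw [PySem.Str.startswith_eq, PySem.Chars.startswith] at h
  have := (List.isPrefixOf_iff_prefix.mp h).length_le
  simpa using this

theorem replace_bd_length {s : String}
    (h : PySem.Str.startswith s "bi_diffusion_" = true) :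
    (PySem.Str.replace s "bi_diffusion_" "").toList.length + 13 ≤ s.toList.length := by
  rw [PySem.Str.startswith_eq, PySem.Chars.startswith] at h
  rw [PySem.Str.toList_replace]
  have := replace_del_length_le h (by decide)
  simpa using this

theorem main_eq : ∀ (f g : Nat) (cur : String), pvNormS cur →
    (PySem.Str.replace cur "bi_diffusion_" "").toList.length ≤ 13 * f →
    (PySem.Str.replace cur "bi_diffusion_" "").toList.length ≤ 13 * g →
    reprAuxA (f+1) (PySem.Str.replace cur "bi_diffusion_" "") = loopB (g+1) cur := by
  intro f
  induction f with
  | zero =>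
    intro g cur hcur hf _
    rw [reprAuxA, loopB]
    have hs : PySem.Str.strip (PySem.Str.replace cur "bi_diffusion_" "") = "" := by
      rw [← String.toList_inj]
      have h1 := length_strip_le (PySem.Str.replace cur "bi_diffusion_" "").toList
      rw [← PySem.Str.toList_strip] at h1
      simp only [Nat.mul_zero, Nat.le_zero] at hf
      have : (PySem.Str.strip (PySem.Str.replace cur "bi_diffusion_" "")).toList.length = 0 := by omega
      simpa [List.length_eq_zero_iff] using this
    rw [hs, if_pos rfl, if_pos rfl]
  | succ f ih =>
    intro g cur hcur hf hg
    rw [reprAuxA, loopB]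
    set s := PySem.Str.strip (PySem.Str.replace cur "bi_diffusion_" "") with hsdef
    have hns : pvNormS s := pvNormS_strip_replace hcur
    have hnorm : PySem.Str.replace (PySem.Str.replace (PySem.Str.lower s) "-" "_") " " "_" = s :=
      normalize_id hns
    simp only [hnorm]
    by_cases he : s = ""
    · simp [he]
    · rw [if_neg he, if_neg he]
      by_cases hm : pvMap.contains s = true
      · rw [if_pos hm, if_pos hm]
      · rw [if_neg hm, if_neg hm]
        by_cases hsw : PySem.Str.startswith s "bi_diffusion_" = true
        · rw [if_pos hsw, if_pos hsw]
          have hslen : s.toList.length ≤ (PySem.Str.replace cur "bi_diffusion_" "").toList.length := by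
            rw [hsdef, PySem.Str.toList_strip]
            simpa using length_strip_le _
          have h13 : 13 ≤ s.toList.length := startswith_length hsw
          have hrec := replace_bd_length hsw
          obtain ⟨g', rfl⟩ : ∃ g', g = g' + 1 := ⟨g - 1, by omega⟩
          exact ih g' s hns (by omega) (by omega)
        · rw [if_neg hsw, if_neg hsw]

-- ===== VERDICT (by name: the statement is the Claim_ definition above) =====
theorem repr_label_py_spec : Claim_equal_repr_label_py := by
  intro value _
  show repr_label_py value = repr_label_py_alt value
  rw [repr_label_py, repr_label_py_alt, reprAuxA]
  set text := PySem.Str.strip value with htext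
  by_cases he : text = ""
  · simp [he]
  · rw [if_neg he, if_neg he]
    simp only
    set cur := PySem.Str.replace (PySem.Str.replace (PySem.Str.lower text) "-" "_") " " "_" with hcur
    by_cases hm : pvMap.contains cur = true
    · rw [if_pos hm, if_pos hm]
    · rw [if_neg hm, if_neg hm]
      by_cases hsw : PySem.Str.startswith cur "bi_diffusion_" = true
      · rw [if_pos hsw, if_pos hsw]
        have hns : pvNormS cur := pvNormS_normalize text
        have h13 : 13 ≤ cur.toList.length := startswith_length hsw
        have hrec := replace_bd_length hsw
        have hcl : cur.toList.length ≤ text.toList.length := by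
          rw [hcur, PySem.Str.toList_replace]
          calc (PySem.Chars.replace (PySem.Str.replace (PySem.Str.lower text) "-" "_").toList
                (" ".toList) ("_".toList)).length
              ≤ (PySem.Str.replace (PySem.Str.lower text) "-" "_").toList.length :=
                replace_length_le (by decide) (by decide)
            _ ≤ (PySem.Str.lower text).toList.length := by
                rw [PySem.Str.toList_replace]
                exact replace_length_le (by decide) (by decide)
            _ = text.toList.length := by
                rw [PySem.Str.toList_lower, PySem.Chars.lower, List.length_map]
        have htl : text.toList.length ≤ value.toList.length := by
          rw [htext, PySem.Str.toList_strip]; exact length_strip_le _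
        obtain ⟨f, hfv⟩ : ∃ f, value.toList.length = f + 1 := ⟨value.toList.length - 1, by omega⟩
        obtain ⟨g, hgc⟩ : ∃ g, cur.toList.length = g + 1 := ⟨cur.toList.length - 1, by omega⟩
        rw [hfv, hgc]
        exact main_eq f g cur hns (by omega) (by omega)
      · rw [if_neg hsw, if_neg hsw]
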